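-- pv_equiv track=rewrite | github.com/nghiphaam/Nexa | pre_train.py | iter_stream_text_batches
-- ===== SOURCE A (Python) =====
-- from itertools import islice
--
-- def iter_stream_text_batches(ds, max_samples: int, batch_size: int = 10000):
--     batch = []
--     stream = ds if max_samples <= 0 else islice(ds, max_samples)
--     for item in stream:
--         text = item.get("text", "")
--         if not text:
--             continue
--         batch.append(text)
--         if len(batch) >= batch_size:
--             yield batch
--             batch = []
--     if batch:
--         yield batch
-- ===== SOURCE B (Python) =====
-- from itertools import islice
--
-- def iter_stream_text_batches(ds, max_samples: int, batch_size: int = 10000):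
--     stream = ds if max_samples <= 0 else islice(ds, max_samples)
--     texts = (t for item in stream if (t := item.get("text", "")))
--     while True:
--         chunk = list(islice(texts, batch_size))
--         if not chunk:
--             break
--         yield chunk
-- ===== Notes on version B (the rewrite author's own statement) =====
-- stated objective: idiomatic
-- what changed: B replaces A's interleaved loop with manual batch list, counter check and trailing-batch yield by a filter-then-chunk pipeline: a lazy generator of non-empty texts chunked by repeated list(islice(...,batch_size)).
-- outside the precondition, e.g. on iter_stream_text_batches([{'text': 'a'}], 0, 0): A returns [['a']], B returns []; on iter_stream_text_batches([{'text': 'a'}], 0, -1): A returns [['a']], B raises ValueError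
import Mathlib
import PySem

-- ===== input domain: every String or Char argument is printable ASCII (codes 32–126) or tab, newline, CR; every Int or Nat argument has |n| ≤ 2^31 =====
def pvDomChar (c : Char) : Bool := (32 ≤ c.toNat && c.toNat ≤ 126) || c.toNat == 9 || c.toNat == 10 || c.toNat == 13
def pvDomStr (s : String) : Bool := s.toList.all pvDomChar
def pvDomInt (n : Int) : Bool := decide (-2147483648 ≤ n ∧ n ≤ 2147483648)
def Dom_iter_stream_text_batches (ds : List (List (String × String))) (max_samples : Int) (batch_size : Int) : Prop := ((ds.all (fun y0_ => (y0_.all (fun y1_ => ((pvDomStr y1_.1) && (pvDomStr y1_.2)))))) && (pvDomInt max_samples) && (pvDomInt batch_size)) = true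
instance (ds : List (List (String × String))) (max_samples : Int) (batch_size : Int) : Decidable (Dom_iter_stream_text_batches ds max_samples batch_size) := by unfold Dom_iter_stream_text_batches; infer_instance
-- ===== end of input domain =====

-- B replaces A's interleaved batch-accumulator loop by a filter-then-chunk pipeline (same cost; equivalence of return values claimed for batch_size ≥ 1).
-- ===== PORT A =====
def iter_stream_text_batches (ds : List (List (String × String))) (max_samples : Int) (batch_size : Int) : List (List String) :=
  let stream := if max_samples ≤ 0 then ds else ds.take max_samples.toNat
  let st := stream.foldl (fun (s : List (List String) × List String) item =>
    let text := PySem.Dict.getD (PySem.Dict.mk item) "text" ""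
    if text = "" then s
    else
      let batch := s.2 ++ [text]
      if batch_size ≤ (batch.length : Int) then (s.1 ++ [batch], ([] : List String))
      else (s.1, batch)) ([], [])
  if st.2 = [] then st.1 else st.1 ++ [st.2]

-- ===== PORT B =====
-- B's filtered stream: the non-empty texts, in order
def pvTexts (stream : List (List (String × String))) : List String :=
  stream.filterMap (fun item =>
    let t := PySem.Dict.getD (PySem.Dict.mk item) "text" ""
    if t = "" then none else some t)

-- B's chunking loop: repeatedly take batch_size items, stop on an empty take
def pvChunks (bs : Nat) (xs : List String) : List (List String) :=
  if h : xs.take bs = [] then [] else xs.take bs :: pvChunks bs (xs.drop bs)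
termination_by xs.length
decreasing_by
  simp only [List.take_eq_nil_iff, not_or] at h
  have hx := List.length_pos_of_ne_nil h.2
  simp only [List.length_drop]
  omega

def iter_stream_text_batches_alt (ds : List (List (String × String))) (max_samples : Int) (batch_size : Int) : List (List String) :=
  let stream := if max_samples ≤ 0 then ds else ds.take max_samples.toNat
  pvChunks batch_size.toNat (pvTexts stream)

-- ===== PRECONDITION & SPEC =====
-- Pre_ restricts to the natural domain batch_size ≥ 1: for batch_size ≤ 0 Python's A returns
-- its degenerate singleton batches while B (islice chunking) returns nothing or raises ValueError.
def Pre_iter_stream_text_batches (ds : List (List (String × String))) (max_samples : Int) (batch_size : Int) : Prop := 1 ≤ batch_size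
instance (ds : List (List (String × String))) (max_samples : Int) (batch_size : Int) : Decidable (Pre_iter_stream_text_batches ds max_samples batch_size) := by unfold Pre_iter_stream_text_batches; infer_instance
def pvWitness_iter_stream_text_batches : (List (List (String × String))) × Int × Int := ([[("text", "a")], [("text", "b")], [("x", "y")]], 0, 2)

def Spec_iter_stream_text_batches (ds : List (List (String × String))) (max_samples : Int) (batch_size : Int) (out : List (List String)) : Prop := out = iter_stream_text_batches_alt ds max_samples batch_size
instance (ds : List (List (String × String))) (max_samples : Int) (batch_size : Int) (out : List (List String)) : Decidable (Spec_iter_stream_text_batches ds max_samples batch_size out) := by unfold Spec_iter_stream_text_batches; infer_instance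

-- ===== CLAIM (what is proved, stated in full; the proofs are below) =====
def Claim_equal_iter_stream_text_batches : Prop := ∀ (ds : List (List (String × String))) (max_samples : Int) (batch_size : Int), Dom_iter_stream_text_batches ds max_samples batch_size → Pre_iter_stream_text_batches ds max_samples batch_size → Spec_iter_stream_text_batches ds max_samples batch_size (iter_stream_text_batches ds max_samples batch_size)

-- ===== LEMMAS AND PROOFS =====

-- A's loop body specialised to a single already-extracted text
def pvStep (bs : Int) (s : List (List String) × List String) (t : String) : List (List String) × List String :=
  let batch := s.2 ++ [t]
  if bs ≤ (batch.length : Int) then (s.1 ++ [batch], ([] : List String)) else (s.1, batch)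

lemma foldl_filter_eq (bs : Int) :
    ∀ (items : List (List (String × String))) (st : List (List String) × List String),
      items.foldl (fun (s : List (List String) × List String) item =>
        let text := PySem.Dict.getD (PySem.Dict.mk item) "text" ""
        if text = "" then s
        else
          let batch := s.2 ++ [text]
          if bs ≤ (batch.length : Int) then (s.1 ++ [batch], ([] : List String))
          else (s.1, batch)) st
      = (pvTexts items).foldl (pvStep bs) st := by
  intro items
  induction items with
  | nil => intro st; simp [pvTexts]
  | cons it rest ih =>
      intro st
      simp only [pvTexts, List.filterMap_cons, List.foldl_cons] at ih ⊢
      by_cases h : PySem.Dict.getD (PySem.Dict.mk it) "text" "" = ""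
      · simpa [h] using ih st
      · by_cases hf : bs ≤ (st.2.length : Int) + 1
        · simpa [h, hf, pvStep] using
            ih (st.1 ++ [st.2 ++ [PySem.Dict.getD (PySem.Dict.mk it) "text" ""]], ([] : List String))
        · simpa [h, hf, pvStep] using
            ih (st.1, st.2 ++ [PySem.Dict.getD (PySem.Dict.mk it) "text" ""])

lemma pvChunks_nil (bs : Nat) : pvChunks bs [] = [] := by
  rw [pvChunks.eq_def]; simp

lemma pvChunks_short (bs : Nat) (xs : List String) (h1 : xs ≠ []) (h2 : xs.length ≤ bs) :
    pvChunks bs xs = [xs] := by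
  rw [pvChunks.eq_def]
  rw [List.take_of_length_le h2]
  simp [h1, List.drop_eq_nil_of_le h2, pvChunks_nil]

lemma pvChunks_block (bs : Nat) (xs : List String) (hbs : 0 < bs) (h : bs ≤ xs.length) :
    pvChunks bs xs = xs.take bs :: pvChunks bs (xs.drop bs) := by
  rw [pvChunks.eq_def]
  have hne : xs.take bs ≠ [] := by
    simp only [ne_eq, List.take_eq_nil_iff, not_or]
    constructor
    · omega
    · intro hx; subst hx; simp at h; omega
  simp [hne]

def pvFinish (st : List (List String) × List String) : List (List String) :=
  if st.2 = [] then st.1 else st.1 ++ [st.2]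

lemma loop_eq_chunks (bs : Int) (hbs : 1 ≤ bs) :
    ∀ (texts : List String) (acc : List (List String)) (cur : List String),
      cur.length < bs.toNat →
      pvFinish (texts.foldl (pvStep bs) (acc, cur))
      = acc ++ pvChunks bs.toNat (cur ++ texts) := by
  intro texts
  induction texts with
  | nil =>
      intro acc cur hcur
      simp only [List.foldl_nil, List.append_nil, pvFinish]
      by_cases h : cur = []
      · simp [h, pvChunks_nil]
      · simp [h, pvChunks_short bs.toNat cur h (Nat.le_of_lt hcur)]
  | cons t ts ih =>
      intro acc cur hcur
      simp only [List.foldl_cons]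
      have hstep : pvStep bs (acc, cur) t =
          if bs ≤ (cur.length : Int) + 1 then (acc ++ [cur ++ [t]], ([] : List String))
          else (acc, cur ++ [t]) := by
        simp [pvStep]
      by_cases hfull : bs ≤ (cur.length : Int) + 1
      · rw [hstep, if_pos hfull, ih _ [] (by simp; omega)]
        have hlen : (cur ++ [t]).length = bs.toNat := by simp; omega
        rw [show cur ++ t :: ts = (cur ++ [t]) ++ ts from by simp]
        rw [pvChunks_block bs.toNat ((cur ++ [t]) ++ ts) (by omega) (by simp; omega)]
        rw [List.take_append_of_le_length hlen.ge, List.drop_append_of_le_length hlen.ge]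
        rw [List.take_of_length_le hlen.le, List.drop_eq_nil_of_le hlen.le]
        simp
      · rw [hstep, if_neg hfull, ih acc (cur ++ [t]) (by simp; omega)]
        simp

-- ===== VERDICT (by name: the statement is the Claim_ definition above) =====
theorem iter_stream_text_batches_spec : Claim_equal_iter_stream_text_batches := by
  intro ds max_samples batch_size _ hpre
  unfold Pre_iter_stream_text_batches at hpre
  unfold Spec_iter_stream_text_batches iter_stream_text_batches iter_stream_text_batches_alt
  dsimp only
  rw [foldl_filter_eq]
  exact loop_eq_chunks batch_size hpre (pvTexts _) [] [] (by simp; omega)
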